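-- pv_equiv track=rewrite | github.com/wanshoupu/quantum-simulations | common/swap_decompose.py | gray
-- ===== SOURCE A (Python) =====
-- def gray(n1, n2):
--     result = [n1]
--     for i in range(max(n1.bit_length(), n2.bit_length())):
--         mask = 1 << i
--         bit = n2 & mask
--         if result[-1] & mask != bit:
--             result.append((result[-1] ^ mask) | bit)
--     return result
-- ===== SOURCE B (Python) =====
-- def gray(n1, n2):
--     # closed form: element after fixing position p has n2's bits below p+1 and
--     # n1's bits from p+1 up; no running accumulator
--     m = max(n1.bit_length(), n2.bit_length())
--     ps = [i for i in range(m) if (n1 >> i) & 1 != (n2 >> i) & 1]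
--     return [n1] + [(n1 & (-1 << (p + 1))) | (n2 & ((1 << (p + 1)) - 1)) for p in ps]
-- ===== Notes on version B (the rewrite author's own statement) =====
-- stated objective: alternative
-- what changed: A walks the path with a running accumulator, scanning every bit position and flipping result[-1] when it disagrees with n2; B has no accumulator at all: it first collects the differing bit positions, then emits each intermediate value by a per-element closed form (n1's bits above p+1 merged with n2's bits below p+1).
import Mathlib
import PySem

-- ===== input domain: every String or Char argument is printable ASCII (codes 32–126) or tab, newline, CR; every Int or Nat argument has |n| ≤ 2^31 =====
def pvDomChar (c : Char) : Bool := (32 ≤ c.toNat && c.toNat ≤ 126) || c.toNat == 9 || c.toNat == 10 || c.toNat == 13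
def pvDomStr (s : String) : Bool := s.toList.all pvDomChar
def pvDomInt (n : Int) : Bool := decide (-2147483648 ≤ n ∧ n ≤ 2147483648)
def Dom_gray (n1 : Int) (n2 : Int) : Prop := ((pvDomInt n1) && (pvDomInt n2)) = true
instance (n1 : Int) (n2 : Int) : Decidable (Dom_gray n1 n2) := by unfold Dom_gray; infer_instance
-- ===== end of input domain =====

-- B replaces A's stateful accumulator walk by two stages: collect the differing bit
-- positions, then emit each element by an independent closed form (objective: alternative).

-- ===== PORT A =====
-- loop body of A; `result[-1]` is read with pyGetD (the default is never used: result is never empty)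
def grayStep (n2 : Int) (result : List Int) (i : Int) : List Int :=
  let mask : Int := (1 : Int) <<< i.toNat   -- i comes from range(...), so i ≥ 0
  let bit : Int := PySem.Int.band n2 mask
  let last : Int := PySem.List.pyGetD result (-1) 0
  if PySem.Int.band last mask ≠ bit then
    result ++ [PySem.Int.bor (PySem.Int.bxor last mask) bit]
  else result

def gray (n1 : Int) (n2 : Int) : List Int :=
  (PySem.List.pyRange 0 ((max (PySem.Int.bitLength n1) (PySem.Int.bitLength n2) : Nat) : Int) 1).foldl
    (grayStep n2) [n1]

-- ===== PORT B =====
-- Source B stage 1: the differing bit positions; stage 2: a closed-form value per position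
def gray_alt (n1 : Int) (n2 : Int) : List Int :=
  let m : Nat := max (PySem.Int.bitLength n1) (PySem.Int.bitLength n2)
  let ps : List Int := (PySem.List.pyRange 0 (m : Int) 1).filter
    (fun i => PySem.Int.band (n1 >>> i.toNat) 1 ≠ PySem.Int.band (n2 >>> i.toNat) 1)
  [n1] ++ ps.map (fun p =>
    PySem.Int.bor (PySem.Int.band n1 ((-1 : Int) <<< (p + 1).toNat))
                  (PySem.Int.band n2 (((1 : Int) <<< (p + 1).toNat) - 1)))

-- ===== PRECONDITION & SPEC =====
def Spec_gray (n1 : Int) (n2 : Int) (out : List Int) : Prop := out = gray_alt n1 n2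
instance (n1 : Int) (n2 : Int) (out : List Int) : Decidable (Spec_gray n1 n2 out) := by unfold Spec_gray; infer_instance

-- ===== CLAIM (what is proved, stated in full; the proofs are below) =====
def Claim_equal_gray : Prop := ∀ (n1 : Int) (n2 : Int), Dom_gray n1 n2 → Spec_gray n1 n2 (gray n1 n2)

-- ===== LEMMAS AND PROOFS =====

-- Python's bit i of an arbitrary integer (infinite two's complement)
def pvTb (x : Int) (i : Nat) : Bool :=
  if 0 ≤ x then x.toNat.testBit i else !((-x - 1).toNat.testBit i)

lemma pvTb_natCast (n : Nat) (i : Nat) : pvTb (↑n) i = n.testBit i := by simp [pvTb]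

lemma pvTb_neg_aux (c : Nat) (i : Nat) : pvTb (-(c : Int) - 1) i = !(c.testBit i) := by
  unfold pvTb
  rw [if_neg (by omega)]
  norm_num

lemma pvTb_pow (m j : Nat) : pvTb ((2 ^ m : Nat) : Int) j = decide (m = j) := by
  rw [pvTb_natCast, Nat.testBit_two_pow]

-- e's bits are a subset of a's bits → e ≤ a and a - e = a ^^^ e
lemma pvXorSub (a : Nat) : ∀ e : Nat, (∀ j, e.testBit j = true → a.testBit j = true) →
    e ≤ a ∧ a - e = a ^^^ e := by
  induction a using Nat.strong_induction_on with
  | _ a IH =>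
    intro e h
    by_cases ha0 : a = 0
    · subst ha0
      have he0 : e = 0 := Nat.eq_of_testBit_eq (fun i => by
        simp only [Nat.zero_testBit]
        cases hi : e.testBit i
        · rfl
        · exact absurd (h i hi) (by simp))
      subst he0; simp
    · have h' : ∀ j, (e / 2).testBit j = true → (a / 2).testBit j = true := by
        intro j hj
        rw [Nat.testBit_div_two] at hj ⊢
        exact h _ hj
      obtain ⟨hle, hsub⟩ := IH (a / 2) (by omega) (e / 2) h'
      have hb : e % 2 = 1 → a % 2 = 1 := by
        have := h 0
        simpa [Nat.testBit_zero] using this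
      have hx2 : (a ^^^ e) / 2 = a / 2 - e / 2 := by
        have hx2' : (a ^^^ e) / 2 = a / 2 ^^^ e / 2 := by
          apply Nat.eq_of_testBit_eq
          intro i
          simp [Nat.testBit_div_two, Nat.testBit_xor]
        rw [hx2', ← hsub]
      have h0 : (a ^^^ e) % 2 = (a + e) % 2 := by
        have := Nat.testBit_xor a e 0
        simp only [Nat.testBit_zero] at this
        rcases Nat.mod_two_eq_zero_or_one a with h1 | h1 <;>
          rcases Nat.mod_two_eq_zero_or_one e with h2 | h2 <;>
          simp [h1, h2] at this ⊢
      omega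

lemma pvSubAndBit (m k j : Nat) : (m - (m &&& k)).testBit j = (m.testBit j && !(k.testBit j)) := by
  have hsub := pvXorSub m (m &&& k) (by
    intro j hj
    rw [Nat.testBit_and] at hj
    exact (Bool.and_eq_true_iff.mp hj).1)
  rw [hsub.2, Nat.testBit_xor, Nat.testBit_and]
  cases hA : m.testBit j <;> cases hB : k.testBit j <;> rfl

lemma pvTb_bxor (x y : Int) (i : Nat) :
    pvTb (PySem.Int.bxor x y) i = (pvTb x i ^^ pvTb y i) := by
  unfold PySem.Int.bxor
  split_ifs with hx hy hy
  · simp [pvTb, hx, hy, Nat.testBit_xor]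
  · rw [pvTb_neg_aux]
    simp only [pvTb, if_pos hx, if_neg hy]
    rw [Nat.testBit_xor]
    cases hA : x.toNat.testBit i <;> cases hB : (-y - 1).toNat.testBit i <;> simp [hA, hB]
  · rw [pvTb_neg_aux]
    simp only [pvTb, if_pos hy, if_neg hx]
    rw [Nat.testBit_xor]
    cases hA : (-x - 1).toNat.testBit i <;> cases hB : y.toNat.testBit i <;> simp [hA, hB]
  · simp only [pvTb, if_pos (by positivity : (0:Int) ≤ ((((-x - 1).toNat ^^^ (-y - 1).toNat) : Nat) : Int)), if_neg hx, if_neg hy]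
    rw [Int.toNat_natCast, Nat.testBit_xor]
    cases hA : (-x - 1).toNat.testBit i <;> cases hB : (-y - 1).toNat.testBit i <;> simp [hA, hB]

lemma pvTb_band (x y : Int) (i : Nat) :
    pvTb (PySem.Int.band x y) i = (pvTb x i && pvTb y i) := by
  unfold PySem.Int.band
  split_ifs with hx hy hy
  · simp [pvTb, hx, hy, Nat.testBit_and]
  · simp only [pvTb, if_pos hx, if_neg hy, if_pos (by positivity : (0:Int) ≤ ((x.toNat - (x.toNat &&& (-y - 1).toNat) : Nat) : Int))]
    rw [Int.toNat_natCast, pvSubAndBit]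
  · simp only [pvTb, if_pos hy, if_neg hx, if_pos (by positivity : (0:Int) ≤ ((y.toNat - (y.toNat &&& (-x - 1).toNat) : Nat) : Int))]
    rw [Int.toNat_natCast, pvSubAndBit]
    cases hA : (-x - 1).toNat.testBit i <;> cases hB : y.toNat.testBit i <;> simp [hA, hB]
  · rw [pvTb_neg_aux]
    simp only [pvTb, if_neg hx, if_neg hy]
    rw [Nat.testBit_or]
    cases hA : (-x - 1).toNat.testBit i <;> cases hB : (-y - 1).toNat.testBit i <;> simp [hA, hB]

lemma pvTb_bor (x y : Int) (i : Nat) :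
    pvTb (PySem.Int.bor x y) i = (pvTb x i || pvTb y i) := by
  unfold PySem.Int.bor
  split_ifs with hx hy hy
  · simp [pvTb, hx, hy, Nat.testBit_or]
  · rw [pvTb_neg_aux]
    simp only [pvTb, if_pos hx, if_neg hy]
    rw [pvSubAndBit]
    cases hA : x.toNat.testBit i <;> cases hB : (-y - 1).toNat.testBit i <;> simp [hA, hB]
  · rw [pvTb_neg_aux]
    simp only [pvTb, if_pos hy, if_neg hx]
    rw [pvSubAndBit]
    cases hA : (-x - 1).toNat.testBit i <;> cases hB : y.toNat.testBit i <;> simp [hA, hB]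
  · rw [pvTb_neg_aux]
    simp only [pvTb, if_neg hx, if_neg hy]
    rw [Nat.testBit_and]
    cases hA : (-x - 1).toNat.testBit i <;> cases hB : (-y - 1).toNat.testBit i <;> simp [hA, hB]

lemma pvTb_ext {x y : Int} (h : ∀ i, pvTb x i = pvTb y i) : x = y := by
  by_cases hx : 0 ≤ x <;> by_cases hy : 0 ≤ y
  · have : x.toNat = y.toNat := Nat.eq_of_testBit_eq (fun i => by
      have := h i; simpa [pvTb, hx, hy] using this)
    omega
  · exfalso
    have hi := h (x.toNat + (-y - 1).toNat)
    rw [pvTb, pvTb, if_pos hx, if_neg hy] at hi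
    rw [Nat.testBit_lt_two_pow (by calc x.toNat ≤ x.toNat + (-y-1).toNat := by omega
                                      _ < 2 ^ (x.toNat + (-y-1).toNat) := Nat.lt_two_pow_self),
        Nat.testBit_lt_two_pow (by calc (-y-1).toNat ≤ x.toNat + (-y-1).toNat := by omega
                                      _ < 2 ^ (x.toNat + (-y-1).toNat) := Nat.lt_two_pow_self)] at hi
    simp at hi
  · exfalso
    have hi := h ((-x - 1).toNat + y.toNat)
    rw [pvTb, pvTb, if_neg hx, if_pos hy] at hi
    rw [Nat.testBit_lt_two_pow (by calc (-x-1).toNat ≤ (-x-1).toNat + y.toNat := by omega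
                                      _ < 2 ^ ((-x-1).toNat + y.toNat) := Nat.lt_two_pow_self),
        Nat.testBit_lt_two_pow (by calc y.toNat ≤ (-x-1).toNat + y.toNat := by omega
                                      _ < 2 ^ ((-x-1).toNat + y.toNat) := Nat.lt_two_pow_self)] at hi
    simp at hi
  · have : (-x - 1).toNat = (-y - 1).toNat := Nat.eq_of_testBit_eq (fun i => by
      have := h i; simp only [pvTb, if_neg hx, if_neg hy] at this
      exact Bool.not_inj this)
    omega

lemma pvBandPow (x : Int) (m : Nat) :
    PySem.Int.band x ((2 ^ m : Nat) : Int) = if pvTb x m then ((2 ^ m : Nat) : Int) else 0 := by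
  apply pvTb_ext
  intro j
  rw [pvTb_band, pvTb_pow]
  by_cases hxm : pvTb x m
  · rw [if_pos hxm, pvTb_pow]
    by_cases hj : m = j
    · subst hj; simp [hxm]
    · simp [hj]
  · rw [if_neg hxm]
    have h0 : pvTb 0 j = false := by simp [pvTb]
    rw [h0]
    by_cases hj : m = j
    · subst hj; simp [hxm]
    · simp [hj]

lemma pvShiftlCast (x : Int) (k : Nat) : x <<< ((k : Nat) : Int) = x <<< k := Int.shiftLeft_natCast_right x k

-- the closed form of B, as the port writes it (p + 1 already a Nat)
def pvMix (n1 n2 : Int) (k : Nat) : Int :=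
  PySem.Int.bor (PySem.Int.band n1 ((-1 : Int) <<< k))
                (PySem.Int.band n2 (((1 : Int) <<< k) - 1))

lemma pvShiftNegOne (k : Nat) : ((-1 : Int) <<< k) = -((2 ^ k : Nat) : Int) := by
  rw [Int.shiftLeft_eq]
  push_cast
  ring

lemma pvShiftOne (k : Nat) : ((1 : Int) <<< k) - 1 = ((2 ^ k - 1 : Nat) : Int) := by
  rw [Int.shiftLeft_eq]
  push_cast [Nat.cast_sub (Nat.one_le_two_pow)]
  ring

lemma pvTb_negpow (k j : Nat) : pvTb (-((2 ^ k : Nat) : Int)) j = decide (k ≤ j) := by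
  have h : -(-((2 ^ k : Nat) : Int)) - 1 = ((2 ^ k - 1 : Nat) : Int) := by
    push_cast [Nat.cast_sub (Nat.one_le_two_pow)]
    ring
  have hp : (0 : Int) < ((2 ^ k : Nat) : Int) := by positivity
  unfold pvTb
  rw [if_neg (by omega), h, Int.toNat_natCast, Nat.testBit_two_pow_sub_one]
  by_cases hj : j < k <;> simp [hj] <;> omega

lemma pvTb_predpow (k j : Nat) : pvTb ((2 ^ k - 1 : Nat) : Int) j = decide (j < k) := by
  rw [pvTb_natCast, Nat.testBit_two_pow_sub_one]

lemma pvTb_mix (n1 n2 : Int) (k j : Nat) :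
    pvTb (pvMix n1 n2 k) j = if j < k then pvTb n2 j else pvTb n1 j := by
  unfold pvMix
  rw [pvShiftNegOne, pvShiftOne, pvTb_bor, pvTb_band, pvTb_band, pvTb_negpow, pvTb_predpow]
  by_cases hj : j < k
  · simp [hj, show ¬ k ≤ j by omega]
  · simp [hj, show k ≤ j by omega]

lemma pvMix_zero (n1 n2 : Int) : pvMix n1 n2 0 = n1 := by
  apply pvTb_ext
  intro j
  rw [pvTb_mix]
  simp

-- bit i of x read by B's predicate
lemma pvTb_shiftr (x : Int) (k j : Nat) : pvTb (x >>> k) j = pvTb x (k + j) := by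
  cases x with
  | ofNat n =>
    have h : (Int.ofNat n) >>> k = Int.ofNat (n >>> k) := rfl
    rw [h]
    show pvTb ((n >>> k : Nat) : Int) j = pvTb ((n : Nat) : Int) (k + j)
    rw [pvTb_natCast, pvTb_natCast, Nat.testBit_shiftRight]
  | negSucc n =>
    have h : (Int.negSucc n) >>> k = Int.negSucc (n >>> k) := rfl
    rw [h]
    have h1 : (Int.negSucc (n >>> k)) = -((n >>> k : Nat) : Int) - 1 := by
      simp [Int.negSucc_eq]; ring
    have h2 : (Int.negSucc n) = -((n : Nat) : Int) - 1 := by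
      simp [Int.negSucc_eq]; ring
    rw [h1, h2, pvTb_neg_aux, pvTb_neg_aux, Nat.testBit_shiftRight]

lemma pvBandOneShift (x : Int) (i : Nat) :
    PySem.Int.band (x >>> i) 1 = if pvTb x i then 1 else 0 := by
  have h := pvBandPow (x >>> i) 0
  have h1 : ((2 ^ 0 : Nat) : Int) = 1 := by norm_num
  rw [h1] at h
  rw [h, pvTb_shiftr]
  simp

-- A's fold over range m produces n1 followed by the closed forms at the differing
-- positions below m, and its last element is pvMix m
lemma grayA_loop (n1 n2 : Int) (m : Nat) :
    (List.range m).foldl (fun res (i : Nat) => grayStep n2 res (↑i)) [n1] =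
      n1 :: ((List.range m).filter (fun i => pvTb (PySem.Int.bxor n1 n2) i)).map
        (fun p => pvMix n1 n2 (p + 1)) ∧
    PySem.List.pyGetD
      ((List.range m).foldl (fun res (i : Nat) => grayStep n2 res (↑i)) [n1]) (-1) 0
      = pvMix n1 n2 m := by
  induction m with
  | zero =>
    refine ⟨by simp, ?_⟩
    rw [pvMix_zero]
    show PySem.List.pyGetD ([] ++ [n1]) (-1) 0 = n1
    rw [PySem.List.pyGetD_neg_one_append_singleton]
  | succ m ih =>
    obtain ⟨hfold, hlast⟩ := ih
    have hfold' : (List.range (m + 1)).foldl (fun res (i : Nat) => grayStep n2 res (↑i)) [n1]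
        = grayStep n2 ((List.range m).foldl (fun res (i : Nat) => grayStep n2 res (↑i)) [n1]) (↑m) := by
      rw [List.range_succ, List.foldl_append, List.foldl_cons, List.foldl_nil]
    have hmask : ((1 : Int) <<< ((m : Int)).toNat) = ((2 ^ m : Nat) : Int) := by
      rw [Int.toNat_natCast, Int.shiftLeft_eq]
      push_cast; ring
    set g := PySem.Int.bxor n1 n2 with hg
    have htbmix : pvTb (pvMix n1 n2 m) m = pvTb n1 m := by
      rw [pvTb_mix]; simp
    have hstep : grayStep n2 ((List.range m).foldl (fun res (i : Nat) => grayStep n2 res (↑i)) [n1]) (↑m)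
        = if PySem.Int.band (pvMix n1 n2 m) ((2 ^ m : Nat) : Int) ≠ PySem.Int.band n2 ((2 ^ m : Nat) : Int)
          then ((List.range m).foldl (fun res (i : Nat) => grayStep n2 res (↑i)) [n1])
            ++ [PySem.Int.bor (PySem.Int.bxor (pvMix n1 n2 m) ((2 ^ m : Nat) : Int))
                  (PySem.Int.band n2 ((2 ^ m : Nat) : Int))]
          else ((List.range m).foldl (fun res (i : Nat) => grayStep n2 res (↑i)) [n1]) := by
      show (let mask : Int := (1 : Int) <<< ((m : Int)).toNat
            let bit : Int := PySem.Int.band n2 mask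
            let last : Int := PySem.List.pyGetD ((List.range m).foldl (fun res (i : Nat) => grayStep n2 res (↑i)) [n1]) (-1) 0
            if PySem.Int.band last mask ≠ bit then
              ((List.range m).foldl (fun res (i : Nat) => grayStep n2 res (↑i)) [n1]) ++ [PySem.Int.bor (PySem.Int.bxor last mask) bit]
            else ((List.range m).foldl (fun res (i : Nat) => grayStep n2 res (↑i)) [n1])) = _
      simp only [hmask, hlast]
    by_cases hgm : pvTb g m = true
    · -- bit m differs: A appends, its value is pvMix (m+1)
      have hne : pvTb n1 m ≠ pvTb n2 m := by
        rw [hg, pvTb_bxor] at hgm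
        intro hc; rw [hc] at hgm; simp at hgm
      have hcond : PySem.Int.band (pvMix n1 n2 m) ((2 ^ m : Nat) : Int)
          ≠ PySem.Int.band n2 ((2 ^ m : Nat) : Int) := by
        intro hcc
        apply hne
        have hcc2 := congrArg (fun z => pvTb z m) hcc
        simp only [pvTb_band, pvTb_pow] at hcc2
        simpa [htbmix] using hcc2
      have hval : PySem.Int.bor (PySem.Int.bxor (pvMix n1 n2 m) ((2 ^ m : Nat) : Int))
            (PySem.Int.band n2 ((2 ^ m : Nat) : Int)) = pvMix n1 n2 (m + 1) := by
        apply pvTb_ext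
        intro j
        rw [pvTb_bor, pvTb_bxor, pvTb_band, pvTb_pow, pvTb_mix, pvTb_mix]
        by_cases hj : j = m
        · subst hj
          simp only [lt_irrefl, if_neg (lt_irrefl j), if_pos (Nat.lt_succ_self j), decide_true]
          cases h1 : pvTb n1 j <;> cases h2 : pvTb n2 j <;> simp_all
        · by_cases hjm : j < m
          · simp [Ne.symm hj, hjm, show j < m + 1 by omega]
          · simp [Ne.symm hj, hjm, show ¬ (j < m + 1) by omega]
      have hPs : (List.range (m + 1)).filter (fun i => pvTb g i)
          = (List.range m).filter (fun i => pvTb g i) ++ [m] := by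
        rw [List.range_succ, List.filter_append]
        simp [hgm]
      constructor
      · rw [hfold', hstep, if_pos hcond, hval, hfold, hPs]
        simp
      · rw [hfold', hstep, if_pos hcond, hval, PySem.List.pyGetD_neg_one_append_singleton]
    · -- bit m equal: nothing appended, and pvMix (m+1) = pvMix m
      have hgm' : pvTb g m = false := by simpa using hgm
      have heqb : pvTb n1 m = pvTb n2 m := by
        rw [hg, pvTb_bxor] at hgm'
        cases h1 : pvTb n1 m <;> cases h2 : pvTb n2 m <;> simp_all
      have hcond : ¬ (PySem.Int.band (pvMix n1 n2 m) ((2 ^ m : Nat) : Int)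
          ≠ PySem.Int.band n2 ((2 ^ m : Nat) : Int)) := by
        rw [pvBandPow, pvBandPow, htbmix, heqb]
        simp
      have hmixeq : pvMix n1 n2 (m + 1) = pvMix n1 n2 m := by
        apply pvTb_ext
        intro j
        rw [pvTb_mix, pvTb_mix]
        by_cases hj : j = m
        · subst hj
          simp [heqb]
        · by_cases hjm : j < m
          · simp [hjm, show j < m + 1 by omega]
          · simp [hjm, show ¬ (j < m + 1) by omega]
      have hPs : (List.range (m + 1)).filter (fun i => pvTb g i)
          = (List.range m).filter (fun i => pvTb g i) := by
        rw [List.range_succ, List.filter_append]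
        simp [hgm']
      constructor
      · rw [hfold', hstep, if_neg hcond, hfold, hPs]
      · rw [hfold', hstep, if_neg hcond, hlast, hmixeq]

-- B unfolds to the same canonical list
lemma gray_alt_eq (n1 n2 : Int) :
    gray_alt n1 n2 = n1 ::
      ((List.range (max (PySem.Int.bitLength n1) (PySem.Int.bitLength n2))).filter
        (fun i => pvTb (PySem.Int.bxor n1 n2) i)).map (fun p => pvMix n1 n2 (p + 1)) := by
  simp only [gray_alt]
  rw [PySem.List.pyRange_zero_natCast, List.filter_map, List.map_map, List.singleton_append]
  congr 1
  rw [List.filter_congr (q := fun i => pvTb (PySem.Int.bxor n1 n2) i) ?_]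
  · apply List.map_congr_left
    intro p _
    simp only [Function.comp_apply]
    have ht : ((p : Int) + 1).toNat = p + 1 := by omega
    rw [ht, pvShiftlCast, pvShiftlCast]
    rfl
  · intro i _
    simp only [Function.comp_apply]
    rw [Int.toNat_natCast, pvBandOneShift, pvBandOneShift, pvTb_bxor]
    cases h1 : pvTb n1 i <;> cases h2 : pvTb n2 i <;> simp [h1, h2]

-- ===== VERDICT (by name: the statement is the Claim_ definition above) =====
theorem gray_spec : Claim_equal_gray := by
  intro n1 n2 _
  unfold Spec_gray
  unfold gray
  rw [PySem.List.pyRange_zero_natCast, List.foldl_map]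
  rw [(grayA_loop n1 n2 (max (PySem.Int.bitLength n1) (PySem.Int.bitLength n2))).1, gray_alt_eq]
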